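-- pv_equiv track=rewrite | github.com/tjx0726/nerdle | generate_all.py | check_op
-- ===== SOURCE A (Python) =====
-- ops = ["+", "-", "*", "/"]
--
-- def check_op(l):
--     l = list(l)
--     if l[0] in ops:
--         return True
--     for i in range(len(l)-1):
--         if l[i] in ops and l[i+1] in ops:
--             return True
--     return False
-- ===== SOURCE B (Python) =====
-- ops = ["+", "-", "*", "/"]
--
-- def check_op(l):
--     pos = [i for i, x in enumerate(l) if x in ops]
--     if not pos:
--         return False
--     return pos[0] == 0 or any(b - a == 1 for a, b in zip(pos, pos[1:]))
-- ===== Notes on version B (the rewrite author's own statement) =====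
-- stated objective: alternative
-- what changed: B first extracts the list of operator positions with one enumerate/filter pass and then decides purely on that index list (first position 0, or two positions at distance 1), instead of A's element-level scan testing adjacent list entries for membership.
import Mathlib
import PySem

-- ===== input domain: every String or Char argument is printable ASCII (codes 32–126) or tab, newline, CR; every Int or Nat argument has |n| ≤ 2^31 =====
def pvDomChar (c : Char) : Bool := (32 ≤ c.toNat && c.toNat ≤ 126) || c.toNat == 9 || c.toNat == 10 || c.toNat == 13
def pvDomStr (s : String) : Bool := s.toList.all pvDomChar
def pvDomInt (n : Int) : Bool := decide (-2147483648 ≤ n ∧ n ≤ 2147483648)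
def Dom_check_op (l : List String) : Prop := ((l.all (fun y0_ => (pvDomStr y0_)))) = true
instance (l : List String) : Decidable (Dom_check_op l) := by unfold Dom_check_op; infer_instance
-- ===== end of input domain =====

-- B extracts the operator-position index list once and decides from positions alone (first = 0 or gap of 1), instead of A's element-level adjacent-pair scan; on the empty list A raises IndexError while B returns false (excluded by Pre_).


-- ===== PORT A =====
def opsL : List String := ["+", "-", "*", "/"]

-- A: check l[0], then scan indices i of range(len(l)-1) for a pair of adjacent operators.
def check_op (l : List String) : Bool :=
  match l with
  | [] => false   -- unreachable under Pre_ (Python raises IndexError on l[0])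
  | x :: _ =>
    if opsL.contains x then true
    else (List.range (l.length - 1)).any
      (fun i => opsL.contains (l.getD i "") && opsL.contains (l.getD (i+1) ""))

-- ===== PORT B =====
-- B: collect the operator positions (enumerate + filter), then decide on the index list.
def check_op_alt (l : List String) : Bool :=
  let pos := ((PySem.List.enumerate l).filter (fun p => opsL.contains p.2)).map Prod.fst
  match pos with
  | [] => false
  | p0 :: _ => (p0 == 0) || ((pos.zip pos.tail).any (fun q => q.2 - q.1 == 1))

-- ===== PRECONDITION & SPEC =====
-- Pre_ excludes only the empty list, on which Python A raises IndexError at l[0].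
def Pre_check_op (l : List String) : Prop := l ≠ []
instance (l : List String) : Decidable (Pre_check_op l) := by unfold Pre_check_op; infer_instance
def pvWitness_check_op : List String := (["1", "+", "2"])

def Spec_check_op (l : List String) (out : Bool) : Prop := out = check_op_alt l
instance (l : List String) (out : Bool) : Decidable (Spec_check_op l out) := by unfold Spec_check_op; infer_instance

-- ===== CLAIM (what is proved, stated in full; the proofs are below) =====
def Claim_equal_check_op : Prop := ∀ (l : List String), Dom_check_op l → Pre_check_op l → Spec_check_op l (check_op l)

-- ===== LEMMAS AND PROOFS =====

-- Proof-side bridge: a prev-flag recursion both ports are reduced to.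
def checkOpGo (prev : Bool) (xs : List String) : Bool :=
  match xs with
  | [] => false
  | x :: rest =>
    let isOp := opsL.contains x
    if isOp && prev then true else checkOpGo isOp rest

-- operator positions of l when enumeration starts at s
def posFrom (s : Int) (l : List String) : List Int :=
  ((PySem.List.enumerate l s).filter (fun p => opsL.contains p.2)).map Prod.fst

-- "two positions at distance 1" test on an index list
def dpair (ps : List Int) : Bool := (ps.zip ps.tail).any (fun q => q.2 - q.1 == 1)

def firstIsOp (l : List String) : Bool :=
  match l with
  | [] => false
  | y :: _ => opsL.contains y

theorem posFrom_cons (s : Int) (y : String) (ys : List String) :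
    posFrom s (y :: ys) =
      if y ∈ opsL then s :: posFrom (s+1) ys else posFrom (s+1) ys := by
  by_cases h : y ∈ opsL <;>
    simp [posFrom, PySem.List.enumerate_cons, List.contains_eq_mem, h]

theorem le_of_mem_posFrom (l : List String) : ∀ (s i : Int), i ∈ posFrom s l → s ≤ i := by
  induction l with
  | nil => intro s i h; simp [posFrom, PySem.List.enumerate] at h
  | cons y ys ih =>
    intro s i h
    rw [posFrom_cons] at h
    by_cases hy : y ∈ opsL
    · rw [if_pos hy] at h
      rcases List.mem_cons.mp h with h | h
      · omega
      · have := ih (s+1) i h; omega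
    · rw [if_neg hy] at h
      have := ih (s+1) i h; omega

-- the indexed pairwise scan starting at head h over tail rest equals the flag loop
theorem scan_eq_go (rest : List String) : ∀ (h : String),
    ((List.range ((h :: rest).length - 1)).any
      (fun i => opsL.contains ((h :: rest).getD i "") && opsL.contains ((h :: rest).getD (i+1) "")))
    = checkOpGo (opsL.contains h) rest := by
  induction rest with
  | nil => intro h; simp [checkOpGo]
  | cons y ys ih =>
    intro h
    have hr : List.range ((h :: y :: ys).length - 1)
        = 0 :: (List.range ((y :: ys).length - 1)).map (· + 1) := by
      simp [List.range_succ_eq_map]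
    rw [hr]
    simp only [List.any_cons, List.any_map]
    have := ih y
    simp only [List.length_cons, Nat.add_sub_cancel] at this ⊢
    have hcomp : ((fun i => opsL.contains ((h :: y :: ys).getD i "") && opsL.contains ((h :: y :: ys).getD (i+1) "")) ∘ fun x => x + 1)
        = (fun i => opsL.contains ((y :: ys).getD i "") && opsL.contains ((y :: ys).getD (i+1) "")) := rfl
    rw [hcomp, this]
    simp only [checkOpGo, List.getD_cons_zero, List.getD_cons_succ]
    by_cases hy : y ∈ opsL <;> by_cases hh : h ∈ opsL <;>
      simp [List.contains_eq_mem, hy, hh, Bool.and_comm]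

-- prepending the position s of an operator whose successor positions start at s+1
theorem dpair_cons_posFrom (s : Int) (ys : List String) :
    dpair (s :: posFrom (s+1) ys) = (firstIsOp ys || dpair (posFrom (s+1) ys)) := by
  match ys with
  | [] => simp [posFrom, PySem.List.enumerate, dpair, firstIsOp]
  | z :: zs =>
    rw [posFrom_cons]
    by_cases hz : z ∈ opsL
    · rw [if_pos hz]
      simp [dpair, firstIsOp, List.contains_eq_mem, hz]
    · rw [if_neg hz]
      have hfo : firstIsOp (z :: zs) = false := by
        simp [firstIsOp, List.contains_eq_mem, hz]
      rw [hfo, Bool.false_or]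
      match hps : posFrom (s+1+1) zs with
      | [] => simp [dpair]
      | q :: qs =>
        have hq : s + 1 + 1 ≤ q := le_of_mem_posFrom zs (s+1+1) q (by rw [hps]; simp)
        have hne : (q - s == 1) = false := by simp; omega
        simp [dpair, hne]

-- the flag loop equals the position-list test
theorem go_eq_dpair (l : List String) : ∀ (s : Int) (prev : Bool),
    checkOpGo prev l = ((prev && firstIsOp l) || dpair (posFrom s l)) := by
  induction l with
  | nil => intro s prev; simp [checkOpGo, posFrom, PySem.List.enumerate, dpair, firstIsOp]
  | cons y ys ih =>
    intro s prev
    rw [posFrom_cons]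
    by_cases hy : y ∈ opsL
    · rw [if_pos hy]
      have hfo : firstIsOp (y :: ys) = true := by
        simp [firstIsOp, List.contains_eq_mem, hy]
      have hcy : opsL.contains y = true := by
        simp [List.contains_eq_mem, hy]
      rw [hfo, Bool.and_true, dpair_cons_posFrom]
      simp only [checkOpGo, hcy, Bool.true_and]
      by_cases hp : prev = true
      · simp [hp]
      · simp [hp, ih (s+1) true]
    · rw [if_neg hy]
      have hcy : opsL.contains y = false := by
        simp [List.contains_eq_mem, hy]
      have hfo : firstIsOp (y :: ys) = false := by
        simp [firstIsOp, List.contains_eq_mem, hy]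
      rw [hfo, Bool.and_false, Bool.false_or]
      simp only [checkOpGo, hcy, Bool.false_and, Bool.false_eq_true, if_false]
      exact ih (s+1) false

-- B's port on a nonempty list, in the same normal form
theorem alt_eq (x : String) (rest : List String) :
    check_op_alt (x :: rest) = (firstIsOp (x :: rest) || dpair (posFrom 1 rest)) := by
  show (match posFrom 0 (x :: rest) with
        | [] => false
        | p0 :: _ => (p0 == 0) || dpair (posFrom 0 (x :: rest))) = _
  rw [posFrom_cons]
  have h01 : (0 : Int) + 1 = 1 := by norm_num
  rw [h01]
  by_cases hx : x ∈ opsL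
  · rw [if_pos hx]
    simp [firstIsOp, List.contains_eq_mem, hx]
  · rw [if_neg hx]
    have hfo : firstIsOp (x :: rest) = false := by
      simp [firstIsOp, List.contains_eq_mem, hx]
    rw [hfo, Bool.false_or]
    match hps : posFrom 1 rest with
    | [] => simp [dpair]
    | q :: qs =>
      have hq : (1:Int) ≤ q := le_of_mem_posFrom rest 1 q (by rw [hps]; simp)
      have hne : (q == 0) = false := by simp; omega
      simp [hne]

-- ===== VERDICT (by name: the statements are the Claim_ definitions above) =====
theorem check_op_spec : Claim_equal_check_op := by
  intro l _ hpre
  unfold Spec_check_op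
  match l with
  | [] => exact absurd rfl hpre
  | x :: rest =>
    rw [alt_eq]
    have hA : check_op (x :: rest)
        = (if opsL.contains x = true then true
           else (List.range ((x :: rest).length - 1)).any
             (fun i => opsL.contains ((x :: rest).getD i "") && opsL.contains ((x :: rest).getD (i+1) ""))) := rfl
    rw [hA]
    by_cases hx : x ∈ opsL
    · have hcx : opsL.contains x = true := by simp [List.contains_eq_mem, hx]
      rw [if_pos hcx]
      simp only [firstIsOp, hcx, Bool.true_or]

    · have hcx : opsL.contains x = false := by simp [List.contains_eq_mem, hx]
      rw [if_neg (by simp [List.contains_eq_mem, hx])]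
      rw [scan_eq_go rest x, go_eq_dpair rest 1 (opsL.contains x), hcx]
      simp [firstIsOp, List.contains_eq_mem, hx]
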